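-- pv_equiv track=rewrite | github.com/lorenzopalaia/Advent-of-Code-2024 | 12/solution.py | calc_perimeter
-- ===== SOURCE A (Python) =====
-- def calc_perimeter(region):
--   perimeter = 0
--   for i, j in region:
--     perimeter += 4
--
--     up_i, up_j = i - 1, j
--     if (up_i, up_j) in region:
--       perimeter -= 2
--
--     left_i, left_j = i, j - 1
--     if (left_i, left_j) in region:
--       perimeter -= 2
--
--   return perimeter
-- ===== SOURCE B (Python) =====
-- def calc_perimeter(region):
--     perimeter = 0
--     for i, j in region:
--         for ni, nj in ((i - 1, j), (i + 1, j), (i, j - 1), (i, j + 1)):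
--             if (ni, nj) not in region:
--                 perimeter += 1
--     return perimeter
-- ===== Notes on version B (the rewrite author's own statement) =====
-- stated objective: idiomatic
-- what changed: B counts each cell's four exposed sides symmetrically (one +1 per neighbor absent from the region) instead of A's asymmetric +4 with -2 for an up/left neighbor present; Pre_ excludes lists with duplicate cells, where A's shared-edge double-subtraction and B's per-side count legitimately diverge on a corner no caller of a region function specifies.
import Mathlib
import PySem

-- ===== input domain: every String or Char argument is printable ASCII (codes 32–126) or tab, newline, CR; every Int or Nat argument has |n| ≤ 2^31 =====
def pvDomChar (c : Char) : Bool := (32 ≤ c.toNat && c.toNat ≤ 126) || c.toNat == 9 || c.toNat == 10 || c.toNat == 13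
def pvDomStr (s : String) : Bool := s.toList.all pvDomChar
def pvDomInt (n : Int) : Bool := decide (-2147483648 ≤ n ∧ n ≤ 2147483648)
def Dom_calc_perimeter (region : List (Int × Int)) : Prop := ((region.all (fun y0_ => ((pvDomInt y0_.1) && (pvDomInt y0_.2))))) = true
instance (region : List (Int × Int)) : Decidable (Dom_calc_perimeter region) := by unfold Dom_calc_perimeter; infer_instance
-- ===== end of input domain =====

-- B counts each cell's four exposed sides (+1 per neighbor absent from the region) instead of
-- A's +4 with -2 for each up/left neighbor present: a symmetric, more idiomatic accounting.

-- ===== PORT A =====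
def calc_perimeter (region : List (Int × Int)) : Int :=
  region.foldl (fun perimeter c =>
    let perimeter := perimeter + 4
    let perimeter := if (c.1 - 1, c.2) ∈ region then perimeter - 2 else perimeter
    if (c.1, c.2 - 1) ∈ region then perimeter - 2 else perimeter) 0

-- ===== PORT B =====
def calc_perimeter_alt (region : List (Int × Int)) : Int :=
  region.foldl (fun perimeter c =>
    [(c.1 - 1, c.2), (c.1 + 1, c.2), (c.1, c.2 - 1), (c.1, c.2 + 1)].foldl
      (fun p nb => if nb ∈ region then p else p + 1) perimeter) 0

-- ===== PRECONDITION & SPEC =====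
-- Pre_ excludes lists with duplicate cells: a "region" is conceptually a set, and on duplicated
-- cells A's shared-edge subtraction and B's per-side count are both accidental values.
def Pre_calc_perimeter (region : List (Int × Int)) : Prop := region.Nodup
instance (region : List (Int × Int)) : Decidable (Pre_calc_perimeter region) := by
  unfold Pre_calc_perimeter; infer_instance
def pvWitness_calc_perimeter : (List (Int × Int)) := [(0, 0), (1, 0), (0, 1)]
def Spec_calc_perimeter (region : List (Int × Int)) (out : Int) : Prop := out = calc_perimeter_alt region
instance (region : List (Int × Int)) (out : Int) : Decidable (Spec_calc_perimeter region out) := by unfold Spec_calc_perimeter; infer_instance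

-- ===== CLAIM (what is proved, stated in full; the proofs are below) =====
def Claim_equal_calc_perimeter : Prop := ∀ (region : List (Int × Int)), Dom_calc_perimeter region → Pre_calc_perimeter region → Spec_calc_perimeter region (calc_perimeter region)

-- ===== LEMMAS AND PROOFS =====

-- counts of cells of L whose given neighbor lies in R
def cntU (R L : List (Int × Int)) : Int := (L.filter (fun c => decide ((c.1 - 1, c.2) ∈ R))).length
def cntD (R L : List (Int × Int)) : Int := (L.filter (fun c => decide ((c.1 + 1, c.2) ∈ R))).length
def cntL (R L : List (Int × Int)) : Int := (L.filter (fun c => decide ((c.1, c.2 - 1) ∈ R))).length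
def cntR (R L : List (Int × Int)) : Int := (L.filter (fun c => decide ((c.1, c.2 + 1) ∈ R))).length

theorem foldA (R : List (Int × Int)) :
    ∀ (L : List (Int × Int)) (init : Int),
      L.foldl (fun perimeter c =>
        let perimeter := perimeter + 4
        let perimeter := if (c.1 - 1, c.2) ∈ R then perimeter - 2 else perimeter
        if (c.1, c.2 - 1) ∈ R then perimeter - 2 else perimeter) init
      = init + 4 * L.length - 2 * cntU R L - 2 * cntL R L := by
  intro L
  induction L with
  | nil => intro init; simp [cntU, cntL]
  | cons c L ih =>
    intro init
    simp only [List.foldl_cons, ih, cntU, cntL, List.filter_cons, decide_eq_true_eq]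
    split_ifs <;> simp only [List.length_cons] <;> push_cast <;> ring

theorem stepB (R : List (Int × Int)) (c : Int × Int) (p : Int) :
    [(c.1 - 1, c.2), (c.1 + 1, c.2), (c.1, c.2 - 1), (c.1, c.2 + 1)].foldl
      (fun p nb => if nb ∈ R then p else p + 1) p
    = p + (if (c.1 - 1, c.2) ∈ R then 0 else 1) + (if (c.1 + 1, c.2) ∈ R then 0 else 1)
        + (if (c.1, c.2 - 1) ∈ R then 0 else 1) + (if (c.1, c.2 + 1) ∈ R then 0 else 1) := by
  simp only [List.foldl_cons, List.foldl_nil]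
  split_ifs <;> ring

theorem foldB (R : List (Int × Int)) :
    ∀ (L : List (Int × Int)) (init : Int),
      L.foldl (fun perimeter c =>
        [(c.1 - 1, c.2), (c.1 + 1, c.2), (c.1, c.2 - 1), (c.1, c.2 + 1)].foldl
          (fun p nb => if nb ∈ R then p else p + 1) perimeter) init
      = init + 4 * L.length - cntU R L - cntD R L - cntL R L - cntR R L := by
  intro L
  induction L with
  | nil => intro init; simp [cntU, cntD, cntL, cntR]
  | cons c L ih =>
    intro init
    rw [List.foldl_cons, ih, stepB]
    simp only [cntU, cntD, cntL, cntR, List.filter_cons, decide_eq_true_eq]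
    split_ifs <;> simp only [List.length_cons] <;> push_cast <;> ring

theorem len_shift_row (R : List (Int × Int)) (h : R.Nodup) :
    (R.filter (fun c => decide ((c.1 - 1, c.2) ∈ R))).length
      = (R.filter (fun c => decide ((c.1 + 1, c.2) ∈ R))).length := by
  rw [← List.toFinset_card_of_nodup (h.filter _), ← List.toFinset_card_of_nodup (h.filter _)]
  apply Finset.card_bij (fun c _ => ((c.1 - 1 : Int), c.2))
  · intro a ha
    simp only [List.mem_toFinset, List.mem_filter, decide_eq_true_eq] at ha ⊢
    exact ⟨ha.2, by simpa using ha.1⟩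
  · intro a ha b hb hab
    simp only [Prod.mk.injEq] at hab
    have h1 : a.1 = b.1 := by omega
    exact Prod.ext h1 hab.2
  · intro b hb
    simp only [List.mem_toFinset, List.mem_filter, decide_eq_true_eq] at hb
    refine ⟨((b.1 + 1 : Int), b.2), ?_, ?_⟩
    · simp only [List.mem_toFinset, List.mem_filter, decide_eq_true_eq]
      exact ⟨hb.2, by simpa using hb.1⟩
    · simp

theorem len_shift_col (R : List (Int × Int)) (h : R.Nodup) :
    (R.filter (fun c => decide ((c.1, c.2 - 1) ∈ R))).length
      = (R.filter (fun c => decide ((c.1, c.2 + 1) ∈ R))).length := by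
  rw [← List.toFinset_card_of_nodup (h.filter _), ← List.toFinset_card_of_nodup (h.filter _)]
  apply Finset.card_bij (fun c _ => ((c.1 : Int), c.2 - 1))
  · intro a ha
    simp only [List.mem_toFinset, List.mem_filter, decide_eq_true_eq] at ha ⊢
    exact ⟨ha.2, by simpa using ha.1⟩
  · intro a ha b hb hab
    simp only [Prod.mk.injEq] at hab
    have h2 : a.2 = b.2 := by omega
    exact Prod.ext hab.1 h2
  · intro b hb
    simp only [List.mem_toFinset, List.mem_filter, decide_eq_true_eq] at hb
    refine ⟨((b.1 : Int), b.2 + 1), ?_, ?_⟩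
    · simp only [List.mem_toFinset, List.mem_filter, decide_eq_true_eq]
      exact ⟨hb.2, by simpa using hb.1⟩
    · simp

theorem cnt_shift (R : List (Int × Int)) (h : R.Nodup) : cntU R R = cntD R R := by
  unfold cntU cntD; exact_mod_cast len_shift_row R h

theorem cnt_shift' (R : List (Int × Int)) (h : R.Nodup) : cntL R R = cntR R R := by
  unfold cntL cntR; exact_mod_cast len_shift_col R h

-- ===== VERDICT (by name: the statement is the Claim_ definition above) =====
theorem calc_perimeter_spec : Claim_equal_calc_perimeter := by
  intro region _ hpre
  unfold Spec_calc_perimeter calc_perimeter calc_perimeter_alt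
  rw [foldA region region 0, foldB region region 0,
      cnt_shift region hpre, cnt_shift' region hpre]
  ring
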